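-- pv_equiv track=rewrite | github.com/RavenInDisguise/Python-Programs | Prácticas recursividad/practica_Examen.py | posicionPar
-- ===== SOURCE A (Python) =====
-- def posicionPar(num, posicion, contador=1):
--     if contador==posicion:
--         if((num%10)%2==0):
--             return True
--         else:
--             return False
--     else:
--         return posicionPar(num//10, posicion, contador+1)
-- ===== SOURCE B (Python) =====
-- def posicionPar(num, posicion, contador=1):
--     while contador != posicion:
--         num //= 10
--         contador += 1
--     return (num % 10) % 2 == 0
-- ===== Notes on version B (the rewrite author's own statement) =====
-- stated objective: simpler
-- what changed: Replaced the tail recursion with an iterative while-loop that strips digits in place and a single final parity test, instead of recursive calls and an if/else returning True/False.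
import Mathlib
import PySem

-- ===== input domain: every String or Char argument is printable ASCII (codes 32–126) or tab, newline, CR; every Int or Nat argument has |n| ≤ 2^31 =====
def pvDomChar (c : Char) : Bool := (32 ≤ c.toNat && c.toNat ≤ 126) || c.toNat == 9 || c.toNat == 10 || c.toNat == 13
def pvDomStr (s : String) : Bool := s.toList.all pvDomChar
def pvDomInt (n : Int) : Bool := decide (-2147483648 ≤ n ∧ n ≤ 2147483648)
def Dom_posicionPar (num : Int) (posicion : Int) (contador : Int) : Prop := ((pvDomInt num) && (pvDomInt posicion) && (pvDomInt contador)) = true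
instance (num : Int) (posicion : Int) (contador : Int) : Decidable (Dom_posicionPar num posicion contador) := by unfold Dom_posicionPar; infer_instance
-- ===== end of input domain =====

-- B replaces the tail recursion by an iterative while-loop (simpler); same values wherever A returns.
-- ===== PORT A =====
-- Literal port of A's recursion; the 'posicion ≤ contador' branch is only a totality guard for
-- inputs where the Python recursion never terminates (excluded by Pre_).
def posicionPar (num : Int) (posicion : Int) (contador : Int) : Bool :=
  if contador = posicion then
    (PySem.Int.mod (PySem.Int.mod num 10) 2 == 0)
  else if posicion ≤ contador then false  -- Python diverges here; outside Pre_
  else posicionPar (PySem.Int.floordiv num 10) posicion (contador + 1)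
termination_by (posicion - contador).toNat
decreasing_by omega

-- ===== PORT B =====
-- the while loop of Source B: runs (posicion - contador) times, dividing num by 10 each step
def pvAltLoop (fuel : Nat) (num : Int) : Int :=
  match fuel with
  | 0 => num
  | n + 1 => pvAltLoop n (PySem.Int.floordiv num 10)

def posicionPar_alt (num : Int) (posicion : Int) (contador : Int) : Bool :=
  PySem.Int.mod (PySem.Int.mod (pvAltLoop (posicion - contador).toNat num) 10) 2 == 0

-- ===== PRECONDITION & SPEC =====
-- A recurses forever (RecursionError) when contador > posicion; excluded.
def Pre_posicionPar (num : Int) (posicion : Int) (contador : Int) : Prop := contador ≤ posicion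
instance (num : Int) (posicion : Int) (contador : Int) : Decidable (Pre_posicionPar num posicion contador) := by unfold Pre_posicionPar; infer_instance
def pvWitness_posicionPar : Int × Int × Int := (742, 2, 1)

def Spec_posicionPar (num : Int) (posicion : Int) (contador : Int) (out : Bool) : Prop := out = posicionPar_alt num posicion contador
instance (num : Int) (posicion : Int) (contador : Int) (out : Bool) : Decidable (Spec_posicionPar num posicion contador out) := by unfold Spec_posicionPar; infer_instance

-- ===== CLAIM (what is proved, stated in full; the proofs are below) =====
def Claim_equal_posicionPar : Prop := ∀ (num : Int) (posicion : Int) (contador : Int), Dom_posicionPar num posicion contador → Pre_posicionPar num posicion contador → Spec_posicionPar num posicion contador (posicionPar num posicion contador)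

-- ===== LEMMAS AND PROOFS =====

-- ===== VERDICT (by name: the statement is the Claim_ definition above) =====
lemma posicionPar_eq_alt : ∀ (n : Nat) (num posicion contador : Int),
    contador ≤ posicion → (posicion - contador).toNat = n →
    posicionPar num posicion contador = posicionPar_alt num posicion contador := by
  intro n
  induction n with
  | zero =>
    intro num posicion contador hle hn
    have : contador = posicion := by omega
    subst this
    rw [posicionPar.eq_def]
    simp [posicionPar_alt, pvAltLoop]
  | succ k ih =>
    intro num posicion contador hle hn
    have hne : contador ≠ posicion := by omega
    rw [posicionPar.eq_def]
    simp only [hne, if_false, if_neg (by omega : ¬ posicion ≤ contador)]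
    rw [ih _ posicion (contador + 1) (by omega) (by omega)]
    simp only [posicionPar_alt]
    have h1 : (posicion - contador).toNat = k + 1 := hn
    have h2 : (posicion - (contador + 1)).toNat = k := by omega
    rw [h1, h2, pvAltLoop]

theorem posicionPar_spec : Claim_equal_posicionPar := by
  intro num posicion contador _ hpre
  unfold Spec_posicionPar
  exact posicionPar_eq_alt (posicion - contador).toNat num posicion contador hpre rfl
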